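-- pv_equiv track=rewrite | github.com/pedromiguelpardo2007-sys/python | gfgf.py | divisibles
-- ===== SOURCE A (Python) =====
-- def divisibles(num):
--     lista2 = []
--     num_ini = 300
--     while num_ini > 0:
--         if num_ini % num == 0:
--             lista2.append(num_ini)
--         num_ini -= 1
--     return lista2
-- ===== SOURCE B (Python) =====
-- def divisibles(num):
--     d = abs(num)
--     start = (300 // d) * d
--     return list(range(start, 0, -d))
-- ===== Notes on version B (the rewrite author's own statement) =====
-- stated objective: alternative
-- what changed: B generates the descending multiples directly with range(start, 0, -abs(num)) from the largest multiple of num not exceeding 300, instead of scanning all 300 integers and testing each for divisibility.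
import Mathlib
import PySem

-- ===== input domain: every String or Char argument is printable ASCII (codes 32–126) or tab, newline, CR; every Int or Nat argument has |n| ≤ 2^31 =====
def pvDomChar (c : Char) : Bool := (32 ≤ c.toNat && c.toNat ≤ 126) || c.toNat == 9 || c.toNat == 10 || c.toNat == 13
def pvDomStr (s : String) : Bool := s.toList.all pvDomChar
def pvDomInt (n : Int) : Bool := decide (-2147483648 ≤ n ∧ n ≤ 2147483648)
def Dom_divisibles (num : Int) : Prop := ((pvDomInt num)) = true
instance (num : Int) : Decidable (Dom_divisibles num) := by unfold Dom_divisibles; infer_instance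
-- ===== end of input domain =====

-- B replaces A's scan of all 300 integers (testing each for divisibility) by generating the
-- descending multiples directly with range(start, 0, -abs(num)) — a different algorithm of
-- similar cost; return values agree for every num ≠ 0 (both raise ZeroDivisionError at num = 0).

-- ===== PORT A =====
-- while num_ini > 0: if num_ini % num == 0: lista2.append(num_ini); num_ini -= 1
-- fuel = current value of num_ini (starts at 300, strictly decreasing to 0)
def divLoopA (num : Int) : Nat → List Int → List Int
  | 0, acc => acc
  | Nat.succ k, acc =>
      divLoopA num k
        (if PySem.Int.mod ((k : Int) + 1) num = 0 then acc ++ [(k : Int) + 1] else acc)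

def divisibles (num : Int) : List Int := divLoopA num 300 []

-- ===== PORT B =====
def divisibles_alt (num : Int) : List Int :=
  let d : Int := if num < 0 then -num else num       -- abs(num)
  let start : Int := PySem.Int.floordiv 300 d * d    -- (300 // d) * d
  PySem.List.pyRange start 0 (-d)                    -- list(range(start, 0, -d))

-- ===== PRECONDITION & SPEC =====
-- Pre_ excludes exactly num = 0, where the Python A raises ZeroDivisionError (B does too).
def Pre_divisibles (num : Int) : Prop := num ≠ 0
instance (num : Int) : Decidable (Pre_divisibles num) := by unfold Pre_divisibles; infer_instance
def pvWitness_divisibles : Int := (7)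

def Spec_divisibles (num : Int) (out : List Int) : Prop := out = divisibles_alt num
instance (num : Int) (out : List Int) : Decidable (Spec_divisibles num out) := by unfold Spec_divisibles; infer_instance

-- ===== CLAIM (what is proved, stated in full; the proofs are below) =====
def Claim_equal_divisibles : Prop := ∀ (num : Int), Dom_divisibles num → Pre_divisibles num → Spec_divisibles num (divisibles num)

-- ===== LEMMAS AND PROOFS =====

-- range(a, 0, -d) for 0 < a, 0 < d starts with a
lemma pyRange_negstep_cons (a d : Int) (hd : 0 < d) (ha : 0 < a) :
    PySem.List.pyRange a 0 (-d) = a :: PySem.List.pyRange (a - d) 0 (-d) := by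
  have hdne : d ≠ 0 := ne_of_gt hd
  have hq0 : 0 ≤ (a - 1) / d := Int.ediv_nonneg (by omega) (by omega)
  have hcount : (a - 0 + d - 1) / d = (a - 1) / d + 1 := by
    have h1 : a - 0 + d - 1 = (a - 1) + 1 * d := by ring
    rw [h1, Int.add_mul_ediv_right _ _ hdne]
  unfold PySem.List.pyRange
  simp only [neg_neg, if_neg (by omega : ¬ (-d = 0)), if_neg (by omega : ¬ (0:Int) < -d)]
  rw [if_pos (by omega : (0:Int) < a)]
  by_cases htail : (0:Int) < a - d
  · have hceq : (a - d - 0 + d - 1) / d = (a - 1) / d := by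
      congr 1; ring_nf
    rw [if_pos htail]
    have h1 : ((a - 0 + d - 1) / d).toNat = ((a - d - 0 + d - 1) / d).toNat + 1 := by
      rw [hceq]; omega
    rw [h1, List.range_succ_eq_map]
    simp only [List.map_cons, List.map_map]
    congr 1
    · push_cast; ring
    · apply List.map_congr_left
      intro x _
      simp only [Function.comp_apply]
      push_cast; ring
  · rw [if_neg htail]
    have hq : (a - 1) / d = 0 := Int.ediv_eq_zero_of_lt (by omega) (by omega)
    have h1 : ((a - 0 + d - 1) / d).toNat = 1 := by omega
    rw [h1]
    simp

-- range(a, 0, -d) is empty when a ≤ 0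
lemma pyRange_negstep_nil (a d : Int) (hd : 0 < d) (ha : a ≤ 0) :
    PySem.List.pyRange a 0 (-d) = [] := by
  unfold PySem.List.pyRange
  simp only [neg_neg, if_neg (by omega : ¬ (-d = 0)), if_neg (by omega : ¬ (0:Int) < -d)]
  rw [if_neg (by omega : ¬ (0:Int) < a)]
  simp

-- loop invariant: A's loop with fuel n produces acc ++ the descending multiples of d in (0, n]
lemma divLoopA_eq (num d : Int) (hnum : num ≠ 0) (hd : d = if num < 0 then -num else num) :
    ∀ (n : Nat) (acc : List Int),
      divLoopA num n acc = acc ++ PySem.List.pyRange ((n : Int) - (n : Int) % d) 0 (-d) := by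
  have hd0 : 0 < d := by rcases lt_trichotomy num 0 with h | h | h <;> simp [hd, h] <;> omega
  have hdvd : ∀ x : Int, num ∣ x ↔ d ∣ x := by
    intro x
    by_cases h : num < 0 <;> simp [hd, h, neg_dvd]
  intro n
  induction n with
  | zero =>
      intro acc
      simp [divLoopA, pyRange_negstep_nil 0 d hd0 (by omega)]
  | succ k ih =>
      intro acc
      have hr0 : 0 ≤ (k : Int) % d := Int.emod_nonneg _ (ne_of_gt hd0)
      have hrd : (k : Int) % d < d := Int.emod_lt_of_pos _ hd0
      have hkq : d * ((k : Int) / d) + (k : Int) % d = (k : Int) := Int.mul_ediv_add_emod _ _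
      rw [show divLoopA num (Nat.succ k) acc =
            divLoopA num k
              (if PySem.Int.mod ((k : Int) + 1) num = 0 then acc ++ [(k : Int) + 1] else acc)
          from rfl, ih]
      by_cases h : d ∣ ((k : Int) + 1)
      · rw [if_pos ((PySem.Int.mod_eq_zero_iff_dvd _ _).2 ((hdvd _).2 h))]
        -- here k % d = d - 1
        have hr : (k : Int) % d = d - 1 := by
          have h1 : d ∣ ((k : Int) - (k : Int) % d) := ⟨(k : Int) / d, by linarith [hkq]⟩
          have h2 : d ∣ ((k : Int) % d + 1) := by
            have h3 := dvd_sub h h1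
            have he : (k : Int) + 1 - ((k : Int) - (k : Int) % d) = (k : Int) % d + 1 := by ring
            rwa [he] at h3
          have h3 : d ≤ (k : Int) % d + 1 := Int.le_of_dvd (by omega) h2
          omega
        have hm : ((k : Int) + 1) % d = 0 := Int.emod_eq_zero_of_dvd h
        push_cast
        rw [hm, hr]
        rw [pyRange_negstep_cons ((k : Int) + 1 - 0) d hd0 (by omega)]
        have e1 : (k : Int) + 1 - 0 - d = (k : Int) - (d - 1) := by ring
        have e2 : (k : Int) + 1 - 0 = (k : Int) + 1 := by ring
        rw [e1, e2]
        simp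
      · rw [if_neg (by
          intro hc
          exact h ((hdvd _).1 ((PySem.Int.mod_eq_zero_iff_dvd _ _).1 hc)))]
        -- here (k+1) % d = k % d + 1
        have hlt : (k : Int) % d + 1 < d := by
          rcases eq_or_lt_of_le (by omega : (k : Int) % d + 1 ≤ d) with he | hl
          · exfalso
            exact h ⟨(k : Int) / d + 1, by rw [mul_add, mul_one]; linarith [hkq]⟩
          · exact hl
        have hm : ((k : Int) + 1) % d = (k : Int) % d + 1 := by
          have h1 : (k : Int) + 1 = ((k : Int) % d + 1) + d * ((k : Int) / d) := by linarith [hkq]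
          rw [h1, Int.add_mul_emod_self_left]
          exact Int.emod_eq_of_lt (by omega) hlt
        push_cast
        rw [hm]
        have e1 : (k : Int) + 1 - ((k : Int) % d + 1) = (k : Int) - (k : Int) % d := by ring
        rw [e1]

-- ===== VERDICT (by name: the statement is the Claim_ definition above) =====
theorem divisibles_spec : Claim_equal_divisibles := by
  intro num _ hpre
  have hnum : num ≠ 0 := hpre
  unfold Spec_divisibles divisibles
  simp only [divisibles_alt]
  set d : Int := if num < 0 then -num else num with hd
  have hd0 : 0 < d := by rcases lt_trichotomy num 0 with h | h | h <;> simp [hd, h] <;> omega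
  rw [divLoopA_eq num d hnum hd 300 []]
  rw [PySem.Int.floordiv_eq_ediv_of_pos hd0]
  have h2 : (300 : Int) / d * d = d * ((300 : Int) / d) := mul_comm _ _
  have h3 : d * ((300 : Int) / d) + (300 : Int) % d = 300 := Int.mul_ediv_add_emod _ _
  have h4 : (300 : Int) / d * d = 300 - 300 % d := by linarith [h2, h3]
  rw [h4]
  norm_num
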